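-- pv_equiv track=rewrite | github.com/jonDomino/nba_scanner | kalshi_top_of_book_probs.py | get_yes_ask_prices_and_liquidity
-- ===== SOURCE A (Python) =====
-- from typing import Dict, Any, Optional
--
-- def get_yes_ask_prices_and_liquidity(orderbook: Dict[str, Any]) -> tuple:
--     """
--     Extract best YES ask, inside ask, and their liquidity from orderbook.
--
--     Best YES ask = 100 - max(NO bid prices)
--     Inside ask = best_ask - 1 if best_ask >= 2, else None
--     Liquidity = quantity of NO bids at the corresponding price level
--
--     Args:
--         orderbook: Kalshi orderbook dict with "no" bid array (format: [[price_cents, qty], ...])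
--
--     Returns:
--         (best_yes_ask_cents, inside_yes_ask_cents, best_ask_liq, inside_ask_liq)
--         Liquidity values are quantities (int) or None if no liquidity
--     """
--     no_bids = orderbook.get("no") or []
--
--     if not no_bids or not isinstance(no_bids, list):
--         return (None, None, None, None)
--
--     # Find max NO bid price and its liquidity (don't assume ordering)
--     max_no_bid_price = None
--     max_no_bid_qty = None
--
--     # Also collect all NO bids by price for liquidity lookup
--     no_bids_by_price = {}
--
--     for bid in no_bids:
--         if isinstance(bid, list) and len(bid) >= 2:
--             price = bid[0]
--             qty = bid[1]
--
--             # Track max price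
--             if max_no_bid_price is None or price > max_no_bid_price:
--                 max_no_bid_price = price
--                 max_no_bid_qty = qty
--
--             # Accumulate quantities by price (in case multiple entries at same price)
--             if price in no_bids_by_price:
--                 no_bids_by_price[price] += qty
--             else:
--                 no_bids_by_price[price] = qty
--
--     if max_no_bid_price is None:
--         return (None, None, None, None)
--
--     # Best YES ask = 100 - max(NO bid price)
--     best_yes_ask_cents = 100 - max_no_bid_price
--
--     # Liquidity at best ask = quantity of NO bids at max price
--     best_ask_liq = no_bids_by_price.get(max_no_bid_price, 0) if max_no_bid_price else None
--
--     # Inside ask = best_ask - 1 if best_ask >= 2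
--     inside_yes_ask_cents = best_yes_ask_cents - 1 if best_yes_ask_cents >= 2 else None
--
--     # Liquidity at inside ask = quantity of NO bids at price = 100 - inside_ask
--     inside_ask_liq = None
--     if inside_yes_ask_cents is not None:
--         corresponding_no_bid_price = 100 - inside_yes_ask_cents
--         inside_ask_liq = no_bids_by_price.get(corresponding_no_bid_price, 0)
--
--     return (best_yes_ask_cents, inside_yes_ask_cents, best_ask_liq, inside_ask_liq)
-- ===== SOURCE B (Python) =====
-- def get_yes_ask_prices_and_liquidity(orderbook):
--     no_bids = orderbook.get("no") or []
--     if not no_bids or not isinstance(no_bids, list):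
--         return (None, None, None, None)
--     # Single pass: running maximum price with the summed quantity at that price.
--     top = None  # (max_price_so_far, total_qty_at_that_price)
--     for bid in no_bids:
--         if isinstance(bid, list) and len(bid) >= 2:
--             p, q = bid[0], bid[1]
--             if top is None or p > top[0]:
--                 top = (p, q)
--             elif p == top[0]:
--                 top = (p, top[1] + q)
--     if top is None:
--         return (None, None, None, None)
--     max_price, top_qty = top
--     best = 100 - max_price
--     best_liq = top_qty if max_price else None
--     if best >= 2:
--         # inside NO level is max_price + 1, strictly above the maximum bid: no liquidity there
--         return (best, best - 1, best_liq, 0)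
--     return (best, None, best_liq, None)
-- ===== Notes on version B (the rewrite author's own statement) =====
-- stated objective: simpler
-- what changed: B drops A's full price->qty dict and post-loop lookups: one pass keeps only a running (max price, summed qty at that price) pair, and the inside-level liquidity is returned as the constant 0 because that level (max_price+1) lies strictly above the maximum bid so no bid can sit there.
import Mathlib
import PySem

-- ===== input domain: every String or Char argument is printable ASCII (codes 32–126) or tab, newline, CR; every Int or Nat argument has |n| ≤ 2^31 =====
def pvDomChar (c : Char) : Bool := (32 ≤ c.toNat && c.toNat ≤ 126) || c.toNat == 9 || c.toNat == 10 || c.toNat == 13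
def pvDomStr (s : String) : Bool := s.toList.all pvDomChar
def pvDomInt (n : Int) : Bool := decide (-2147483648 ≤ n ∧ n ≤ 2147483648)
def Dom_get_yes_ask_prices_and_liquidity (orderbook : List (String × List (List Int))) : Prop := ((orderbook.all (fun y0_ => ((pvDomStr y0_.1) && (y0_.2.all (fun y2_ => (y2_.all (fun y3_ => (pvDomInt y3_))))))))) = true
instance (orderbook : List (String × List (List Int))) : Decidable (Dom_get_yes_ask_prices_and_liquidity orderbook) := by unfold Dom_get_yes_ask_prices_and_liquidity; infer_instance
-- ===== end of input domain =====

-- B replaces A's price->qty dict and lookups with a single pass keeping only a running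
-- (max price, summed qty at that price) pair, and returns 0 for the inside-level liquidity,
-- which is always empty because it lies strictly above the maximum bid (objective: simpler).


-- ===== PORT A =====
-- loop body of A: updates (max_no_bid_price, max_no_bid_qty, no_bids_by_price).
-- bid[0]/bid[1] are ported as getD, exact because the branch guarantees len(bid) >= 2.
def pvStepA (s : Option Int × Option Int × PySem.Dict Int Int) (bid : List Int) :
    Option Int × Option Int × PySem.Dict Int Int :=
  if 2 ≤ (bid.length : Int) then
    let price := bid.getD 0 0
    let qty := bid.getD 1 0
    let mpq : Option Int × Option Int :=
      match s.1 with
      | none => (some price, some qty)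
      | some m => if m < price then (some price, some qty) else (some m, s.2.1)
    let d := s.2.2
    let d' := if d.contains price then d.insert price (d.getD price 0 + qty)
              else d.insert price qty
    (mpq.1, mpq.2, d')
  else s

def get_yes_ask_prices_and_liquidity (orderbook : List (String × List (List Int))) : Option Int × Option Int × Option Int × Option Int :=
  let no_bids := ((PySem.Dict.mk orderbook).get? "no").getD []
  if no_bids.isEmpty then (none, none, none, none)
  else
    let st := no_bids.foldl pvStepA (none, none, PySem.Dict.empty)
    match st.1 with
    | none => (none, none, none, none)
    | some mp =>
      let best_yes_ask_cents := 100 - mp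
      let best_ask_liq : Option Int := if mp ≠ 0 then some (st.2.2.getD mp 0) else none
      let inside_yes_ask_cents : Option Int :=
        if 2 ≤ best_yes_ask_cents then some (best_yes_ask_cents - 1) else none
      let inside_ask_liq : Option Int :=
        match inside_yes_ask_cents with
        | some i => some (st.2.2.getD (100 - i) 0)
        | none => none
      (some best_yes_ask_cents, inside_yes_ask_cents, best_ask_liq, inside_ask_liq)

-- ===== PORT B =====
-- loop body of B: running (max price, summed qty at that price); bid[0]/bid[1] as getD, exact
-- because the branch guarantees len(bid) >= 2.
def pvStepB (s : Option (Int × Int)) (bid : List Int) : Option (Int × Int) :=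
  if 2 ≤ (bid.length : Int) then
    let p := bid.getD 0 0
    let q := bid.getD 1 0
    match s with
    | none => some (p, q)
    | some (m, t) => if m < p then some (p, q) else if p = m then some (m, t + q) else some (m, t)
  else s

def get_yes_ask_prices_and_liquidity_alt (orderbook : List (String × List (List Int))) : Option Int × Option Int × Option Int × Option Int :=
  let no_bids := ((PySem.Dict.mk orderbook).get? "no").getD []
  if no_bids.isEmpty then (none, none, none, none)
  else
    match no_bids.foldl pvStepB none with
    | none => (none, none, none, none)
    | some (max_price, top_qty) =>
      let best := 100 - max_price
      let best_liq : Option Int := if max_price ≠ 0 then some top_qty else none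
      if 2 ≤ best then (some best, some (best - 1), best_liq, some 0)
      else (some best, none, best_liq, none)

-- ===== PRECONDITION & SPEC =====
def Spec_get_yes_ask_prices_and_liquidity (orderbook : List (String × List (List Int))) (out : Option Int × Option Int × Option Int × Option Int) : Prop := out = get_yes_ask_prices_and_liquidity_alt orderbook
instance (orderbook : List (String × List (List Int))) (out : Option Int × Option Int × Option Int × Option Int) : Decidable (Spec_get_yes_ask_prices_and_liquidity orderbook out) := by unfold Spec_get_yes_ask_prices_and_liquidity; infer_instance

-- ===== CLAIM (what is proved, stated in full; the proofs are below) =====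
def Claim_equal_get_yes_ask_prices_and_liquidity : Prop := ∀ (orderbook : List (String × List (List Int))), Dom_get_yes_ask_prices_and_liquidity orderbook → Spec_get_yes_ask_prices_and_liquidity orderbook (get_yes_ask_prices_and_liquidity orderbook)

-- ===== LEMMAS AND PROOFS =====
-- valid prices of a bid list
def pvPrices (l : List (List Int)) : List Int :=
  (l.filter (fun b => decide (2 ≤ (b.length : Int)))).map (fun b => b.getD 0 0)

-- total quantity over valid bids at price p (describes A's dict entries)
def pvQtyAt (no_bids : List (List Int)) (p : Int) : Int :=
  ((no_bids.filter (fun b => decide (2 ≤ (b.length : Int)) && (b.getD 0 0 == p))).map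
    (fun b => b.getD 1 0)).sum

-- A's running-max update on the Option state, isolated for the proofs.
def pvMaxStep (mp : Option Int) (p : Int) : Option Int :=
  match mp with
  | none => some p
  | some m => if m < p then some p else some m

theorem pvMaxStep_eq_max (m p : Int) : pvMaxStep (some m) p = some (max m p) := by
  have hdef : pvMaxStep (some m) p = if m < p then some p else some m := rfl
  rw [hdef, max_def]
  by_cases h1 : m < p
  · rw [if_pos h1, if_pos (le_of_lt h1)]
  · rw [if_neg h1]
    by_cases h2 : m ≤ p
    · rw [if_pos h2]; congr 1; omega
    · rw [if_neg h2]

theorem pvFoldMax_some (t : List Int) (m : Int) :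
    t.foldl pvMaxStep (some m) = some (t.foldl max m) := by
  induction t generalizing m with
  | nil => rfl
  | cons p t ih =>
    rw [List.foldl_cons, pvMaxStep_eq_max, ih, List.foldl_cons]

theorem pvLeFoldMax (l : List Int) (m : Int) : m ≤ l.foldl max m := by
  induction l generalizing m with
  | nil => exact le_refl m
  | cons p t ih => exact le_trans (le_max_left m p) (ih (max m p))

theorem pvMemLeFoldMax (l : List Int) (m x : Int) (hx : x ∈ l) : x ≤ l.foldl max m := by
  induction l generalizing m with
  | nil => cases hx
  | cons p t ih =>
    rw [List.foldl_cons]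
    rcases List.mem_cons.mp hx with h | h
    · exact le_trans (h ▸ le_max_right m p) (pvLeFoldMax t (max m p))
    · exact ih (max m p) h

theorem pvFold_fst (l : List (List Int)) (mp mq : Option Int) (d : PySem.Dict Int Int) :
    (l.foldl pvStepA (mp, mq, d)).1 = (pvPrices l).foldl pvMaxStep mp := by
  induction l generalizing mp mq d with
  | nil => rfl
  | cons b t ih =>
    simp only [List.foldl_cons, pvStepA, pvPrices]
    by_cases h : (2 : Int) ≤ b.length
    · rw [if_pos h, List.filter_cons_of_pos (by simpa using h), List.map_cons, List.foldl_cons]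
      rw [ih]
      show _ = (pvPrices t).foldl pvMaxStep (pvMaxStep mp (b.getD 0 0))
      congr 1
      cases mp with
      | none => rfl
      | some m =>
        show (if m < b.getD 0 0 then (some (b.getD 0 0), some (b.getD 1 0)) else (some m, mq)).1
            = if m < b.getD 0 0 then some (b.getD 0 0) else some m
        split_ifs <;> rfl
    · rw [if_neg h, List.filter_cons_of_neg (by simpa using h)]
      exact ih _ _ _

theorem pvQtyAt_cons (b : List Int) (t : List (List Int)) (p : Int) :
    pvQtyAt (b :: t) p =
      (if (2 : Int) ≤ b.length ∧ b.getD 0 0 = p then b.getD 1 0 else 0) + pvQtyAt t p := by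
  unfold pvQtyAt
  by_cases h1 : (2 : Int) ≤ b.length
  · by_cases h2 : b.getD 0 0 = p
    · rw [List.filter_cons_of_pos (by simp [h1]; exact h2), if_pos ⟨h1, h2⟩]
      simp
    · rw [List.filter_cons_of_neg (by simp [h1]; exact h2), if_neg (fun hx => h2 hx.2)]
      ring
  · rw [List.filter_cons_of_neg (by simp [h1]), if_neg (fun hx => h1 hx.1)]
    ring

theorem pvFold_dict (l : List (List Int)) (mp mq : Option Int) (d : PySem.Dict Int Int) (p : Int) :
    (l.foldl pvStepA (mp, mq, d)).2.2.getD p 0 = d.getD p 0 + pvQtyAt l p := by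
  induction l generalizing mp mq d with
  | nil => simp [pvQtyAt]
  | cons b t ih =>
    simp only [List.foldl_cons, pvStepA]
    by_cases h : (2 : Int) ≤ b.length
    · rw [if_pos h]
      rw [ih, pvQtyAt_cons]
      by_cases hc : d.contains (b.getD 0 0) = true
      · rw [if_pos hc, PySem.Dict.getD_insert]
        by_cases hp : p = b.getD 0 0
        · rw [if_pos hp, if_pos ⟨h, hp.symm⟩, hp]
          ring
        · rw [if_neg hp, if_neg (fun hx => hp hx.2.symm)]
          ring
      · rw [if_neg hc, PySem.Dict.getD_insert]
        by_cases hp : p = b.getD 0 0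
        · rw [if_pos hp, if_pos ⟨h, hp.symm⟩, hp,
              PySem.Dict.getD_of_not_contains d 0 (by simpa using hc)]
          ring
        · rw [if_neg hp, if_neg (fun hx => hp hx.2.symm)]
          ring
    · rw [if_neg h]
      rw [ih, pvQtyAt_cons, if_neg (fun hx => h hx.1)]
      ring

theorem pvQtyAt_zero (l : List (List Int)) (p : Int) (h : ∀ x ∈ pvPrices l, x < p) :
    pvQtyAt l p = 0 := by
  induction l with
  | nil => rfl
  | cons b t ih =>
    rw [pvQtyAt_cons]
    by_cases hv : (2 : Int) ≤ b.length
    · have hmem : b.getD 0 0 ∈ pvPrices (b :: t) := by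
        unfold pvPrices
        rw [List.filter_cons_of_pos (by simpa using hv)]
        exact List.mem_cons_self
      have hne : ¬ (b.getD 0 0 = p) := ne_of_lt (h _ hmem)
      rw [if_neg (fun hx => hne hx.2), ih (fun x hx => h x (by
        unfold pvPrices at hx ⊢
        rw [List.filter_cons_of_pos (by simpa using hv)]
        exact List.mem_cons_of_mem _ hx))]
      ring
    · rw [if_neg (fun hx => hv hx.1), ih (fun x hx => h x (by
        unfold pvPrices at hx ⊢
        rw [List.filter_cons_of_neg (by simpa using hv)]
        exact hx))]
      ring

-- pvQtyAt_cons when the head bid is valid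
theorem pvQtyAt_cons_valid (b : List Int) (t : List (List Int)) (p : Int)
    (hv : (2 : Int) ≤ b.length) :
    pvQtyAt (b :: t) p = (if b.getD 0 0 = p then b.getD 1 0 else 0) + pvQtyAt t p := by
  rw [pvQtyAt_cons]
  congr 1
  split_ifs with h1 h2 h2
  · rfl
  · exact absurd h1.2 h2
  · exact absurd ⟨hv, h2⟩ h1
  · rfl

-- B's fold from a seeded state: result is the running max with the summed qty at it.
theorem pvFoldB_some (l : List (List Int)) (m s : Int) :
    l.foldl pvStepB (some (m, s)) =
      some ((pvPrices l).foldl max m,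
            (if (pvPrices l).foldl max m = m then s else 0) +
              pvQtyAt l ((pvPrices l).foldl max m)) := by
  induction l generalizing m s with
  | nil => simp [pvPrices, pvQtyAt]
  | cons b t ih =>
    simp only [List.foldl_cons, pvStepB]
    by_cases hv : (2 : Int) ≤ b.length
    · rw [if_pos hv]
      have hpr : pvPrices (b :: t) = b.getD 0 0 :: pvPrices t := by
        unfold pvPrices
        rw [List.filter_cons_of_pos (by simpa using hv)]
        rfl
      rw [hpr, List.foldl_cons]
      by_cases h1 : m < b.getD 0 0
      · rw [if_pos h1, ih, max_eq_right (le_of_lt h1)]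
        have hpM : b.getD 0 0 ≤ (pvPrices t).foldl max (b.getD 0 0) := pvLeFoldMax _ _
        rw [pvQtyAt_cons_valid b t _ hv, Option.some.injEq, Prod.mk.injEq]
        refine ⟨rfl, ?_⟩
        split_ifs with c1 c2 c2 <;> first | linarith | omega
      · rw [if_neg h1]
        have hmx : max m (b.getD 0 0) = m := max_eq_left (by linarith)
        rw [hmx]
        have hmM : m ≤ (pvPrices t).foldl max m := pvLeFoldMax _ _
        by_cases h2 : b.getD 0 0 = m
        · rw [if_pos h2, ih, pvQtyAt_cons_valid b t _ hv, Option.some.injEq, Prod.mk.injEq]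
          refine ⟨rfl, ?_⟩
          split_ifs with c1 c2 c2 <;> first | linarith | omega
        · rw [if_neg h2, ih, pvQtyAt_cons_valid b t _ hv, Option.some.injEq, Prod.mk.injEq]
          refine ⟨rfl, ?_⟩
          split_ifs with c1 c2 c2 <;> first | linarith | omega
    · rw [if_neg hv]
      have hpr : pvPrices (b :: t) = pvPrices t := by
        unfold pvPrices
        rw [List.filter_cons_of_neg (by simpa using hv)]
      have hqa : pvQtyAt (b :: t) = pvQtyAt t := by
        funext p
        rw [pvQtyAt_cons, if_neg (fun hx => hv hx.1)]
        ring
      rw [ih, hpr, hqa]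

-- B's fold from the initial none state, characterised by the valid prices.
theorem pvFoldB_char (l : List (List Int)) :
    l.foldl pvStepB none =
      match pvPrices l with
      | [] => none
      | p :: ps => some (ps.foldl max p, pvQtyAt l (ps.foldl max p)) := by
  induction l with
  | nil => rfl
  | cons b t ih =>
    simp only [List.foldl_cons, pvStepB]
    by_cases hv : (2 : Int) ≤ b.length
    · rw [if_pos hv]
      have hpr : pvPrices (b :: t) = b.getD 0 0 :: pvPrices t := by
        unfold pvPrices
        rw [List.filter_cons_of_pos (by simpa using hv)]
        rfl
      rw [hpr, pvFoldB_some]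
      show _ = some ((pvPrices t).foldl max (b.getD 0 0), pvQtyAt (b :: t) ((pvPrices t).foldl max (b.getD 0 0)))
      rw [pvQtyAt_cons_valid b t _ hv]
      have hpM : b.getD 0 0 ≤ (pvPrices t).foldl max (b.getD 0 0) := pvLeFoldMax _ _
      rw [Option.some.injEq, Prod.mk.injEq]
      refine ⟨rfl, ?_⟩
      split_ifs with c1 c2 c2 <;> first | linarith | omega
    · rw [if_neg hv]
      have hpr : pvPrices (b :: t) = pvPrices t := by
        unfold pvPrices
        rw [List.filter_cons_of_neg (by simpa using hv)]
      have hqa : pvQtyAt (b :: t) = pvQtyAt t := by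
        funext p
        rw [pvQtyAt_cons, if_neg (fun hx => hv hx.1)]
        ring
      rw [ih, hpr, hqa]

-- ===== VERDICT (by name: the statement is the Claim_ definition above) =====
theorem get_yes_ask_prices_and_liquidity_spec : Claim_equal_get_yes_ask_prices_and_liquidity := by
  intro orderbook _
  unfold Spec_get_yes_ask_prices_and_liquidity
  unfold get_yes_ask_prices_and_liquidity get_yes_ask_prices_and_liquidity_alt
  simp only []
  generalize ((PySem.Dict.mk orderbook).get? "no").getD [] = nb
  by_cases hemp : nb.isEmpty
  · simp [hemp]
  · simp only [hemp, Bool.false_eq_true, if_false]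
    have hfst := pvFold_fst nb none none PySem.Dict.empty
    have hB := pvFoldB_char nb
    cases hpr : pvPrices nb with
    | nil =>
      have h1 : (nb.foldl pvStepA (none, none, PySem.Dict.empty)).1 = none := by
        rw [hfst, hpr]; rfl
      have h2 : nb.foldl pvStepB none = none := by
        rw [hB, hpr]
      rw [h1, h2]
    | cons x t =>
      have h1 : (nb.foldl pvStepA (none, none, PySem.Dict.empty)).1 = some (t.foldl max x) := by
        rw [hfst, hpr, List.foldl_cons]
        exact pvFoldMax_some t x
      have h2 : nb.foldl pvStepB none = some (t.foldl max x, pvQtyAt nb (t.foldl max x)) := by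
        rw [hB, hpr]
      rw [h1, h2]
      have hq : ∀ p, (nb.foldl pvStepA (none, none, PySem.Dict.empty)).2.2.getD p 0 = pvQtyAt nb p := by
        intro p
        rw [pvFold_dict nb none none PySem.Dict.empty p, PySem.Dict.getD_empty]
        ring
      simp only [hq]
      have hlt : ∀ y ∈ pvPrices nb, y < t.foldl max x + 1 := by
        intro y hy
        rw [hpr] at hy
        rcases List.mem_cons.mp hy with h | h
        · have := pvLeFoldMax t x
          omega
        · have := pvMemLeFoldMax t x y h
          omega
      by_cases hin : (2 : Int) ≤ 100 - t.foldl max x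
      · simp only [if_pos hin]
        have h3 : (100 : Int) - (100 - t.foldl max x - 1) = t.foldl max x + 1 := by ring
        rw [h3, pvQtyAt_zero nb (t.foldl max x + 1) hlt]
      · simp only [if_neg hin]
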